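-- pv_equiv track=rewrite | github.com/abnormalPotassium/IS211_Assignment13 | recursion.py | compareTo
-- ===== SOURCE A (Python) =====
-- def compareTo(s1,s2):
--     if not len(s1) or not len(s2):
--         if len(s1):
--             return 1
--         elif len(s2):
--             return -1
--         else:
--             return 0
--     else:
--         return compareTo(s1[:-1],s2[:-1])
-- ===== SOURCE B (Python) =====
-- def compareTo(s1, s2):
--     while len(s1) and len(s2):
--         s1, s2 = s1[:-1], s2[:-1]
--     if len(s1):
--         return 1
--     elif len(s2):
--         return -1
--     else:
--         return 0
-- ===== Notes on version B (the rewrite author's own statement) =====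
-- stated objective: alternative
-- what changed: Unrolled A's tail recursion into an explicit while loop that peels the last character of both strings in lockstep and decides 1/-1/0 after the loop.
import Mathlib
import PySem

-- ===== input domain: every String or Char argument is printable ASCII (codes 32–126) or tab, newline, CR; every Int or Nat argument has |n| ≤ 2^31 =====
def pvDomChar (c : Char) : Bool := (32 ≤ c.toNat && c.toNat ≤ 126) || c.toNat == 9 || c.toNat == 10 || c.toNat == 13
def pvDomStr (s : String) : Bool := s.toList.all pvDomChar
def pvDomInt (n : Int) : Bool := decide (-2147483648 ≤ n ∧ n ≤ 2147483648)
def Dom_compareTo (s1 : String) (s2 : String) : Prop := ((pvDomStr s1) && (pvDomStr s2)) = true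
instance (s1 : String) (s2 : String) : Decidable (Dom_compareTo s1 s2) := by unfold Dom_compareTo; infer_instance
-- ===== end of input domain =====

-- B unrolls A's tail recursion into a while loop; same value everywhere (alternative decomposition).

-- ===== PORT A =====
-- A: if either string is empty, decide by the nested if-chain; else recurse on s[:-1] of both.
def compareToAux (l1 l2 : List Char) : Int :=
  if l1.length = 0 ∨ l2.length = 0 then
    if l1.length ≠ 0 then 1
    else if l2.length ≠ 0 then -1
    else 0
  else
    compareToAux l1.dropLast l2.dropLast
termination_by l1.length
decreasing_by
  simp only [List.length_dropLast]
  omega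

def compareTo (s1 : String) (s2 : String) : Int :=
  compareToAux s1.toList s2.toList

-- ===== PORT B =====
-- B: while len(s1) and len(s2): drop last char of both; then the if-chain on the loop's final state.
def compareToLoop (l1 l2 : List Char) : List Char × List Char :=
  if l1.length ≠ 0 ∧ l2.length ≠ 0 then
    compareToLoop l1.dropLast l2.dropLast
  else
    (l1, l2)
termination_by l1.length
decreasing_by
  simp only [List.length_dropLast]
  omega

def compareTo_alt (s1 : String) (s2 : String) : Int :=
  let r := compareToLoop s1.toList s2.toList
  if r.1.length ≠ 0 then 1
  else if r.2.length ≠ 0 then -1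
  else 0

-- ===== PRECONDITION & SPEC =====
def Spec_compareTo (s1 : String) (s2 : String) (out : Int) : Prop := out = compareTo_alt s1 s2
instance (s1 : String) (s2 : String) (out : Int) : Decidable (Spec_compareTo s1 s2 out) := by unfold Spec_compareTo; infer_instance

-- ===== CLAIM (what is proved, stated in full; the proofs are below) =====
def Claim_equal_compareTo : Prop := ∀ (s1 : String) (s2 : String), Dom_compareTo s1 s2 → Spec_compareTo s1 s2 (compareTo s1 s2)

-- ===== LEMMAS AND PROOFS =====
theorem compareToAux_eq_loop (l1 l2 : List Char) :
    compareToAux l1 l2 =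
      (let r := compareToLoop l1 l2
       if r.1.length ≠ 0 then (1 : Int) else if r.2.length ≠ 0 then -1 else 0) := by
  induction l1, l2 using compareToLoop.induct with
  | case1 l1 l2 h ih =>
    have h0 : ¬(l1.length = 0 ∨ l2.length = 0) := by tauto
    rw [compareToAux, compareToLoop, if_neg h0, if_pos h]
    exact ih
  | case2 l1 l2 h =>
    have h0 : l1.length = 0 ∨ l2.length = 0 := by tauto
    rw [compareToAux, compareToLoop, if_pos h0, if_neg h]

-- ===== VERDICT (by name: the statement is the Claim_ definition above) =====
theorem compareTo_spec : Claim_equal_compareTo := by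
  intro s1 s2 _
  unfold Spec_compareTo compareTo compareTo_alt
  exact compareToAux_eq_loop s1.toList s2.toList
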